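-- pv_equiv track=rewrite | github.com/youngyangyang/praxys | scripts/translate_missing.py | _icu_variable_names
-- ===== SOURCE A (Python) =====
-- def _icu_variable_names(s: str) -> list[str]:
--     """Walk `s` and extract the variable names of every *outermost* ICU
--     placeholder. Handles nested braces in plural/select branches:
--
--         "{count, plural, one {# item} other {# items}}"  ->  ["count"]
--         "Hello {name}, you have {count} runs"           ->  ["name", "count"]
--         "{count, plural, other {# 项}}"                 ->  ["count"]
--
--     The comparison is on variable names only — branch contents (`# item` vs
--     `# items` vs `# 项`) are allowed to differ, which is the whole point of
--     translating plural branches.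
--     """
--     names: list[str] = []
--     i = 0
--     n = len(s)
--     while i < n:
--         if s[i] != "{":
--             i += 1
--             continue
--         # Balance-match braces to find the end of the outer placeholder.
--         depth = 1
--         j = i + 1
--         while j < n and depth > 0:
--             if s[j] == "{":
--                 depth += 1
--             elif s[j] == "}":
--                 depth -= 1
--             j += 1
--         if depth != 0:
--             # Unbalanced — treat the rest as literal, bail.
--             break
--         # `{` at i, matching `}` at j-1. Content is s[i+1 : j-1].
--         inner = s[i + 1 : j - 1]
--         # Variable name is everything before the first comma (or the whole
--         # thing for a simple {name} placeholder).
--         head = inner.split(",", 1)[0].strip()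
--         names.append(head)
--         i = j
--     return names
-- ===== SOURCE B (Python) =====
-- def _icu_variable_names(s: str) -> list[str]:
--     # Single flat pass keeping an integer depth and a buffer of the current
--     # top-level placeholder's content, instead of a nested brace-matching scan.
--     names: list[str] = []
--     depth = 0
--     buf: list[str] = []
--     for ch in s:
--         if ch == "{":
--             if depth == 0:
--                 buf = []
--             else:
--                 buf.append(ch)
--             depth += 1
--         elif ch == "}" and depth > 0:
--             depth -= 1
--             if depth == 0:
--                 inner = "".join(buf)
--                 names.append(inner.split(",", 1)[0].strip())
--             else:
--                 buf.append(ch)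
--         elif depth > 0:
--             buf.append(ch)
--     return names
-- ===== Notes on version B (the rewrite author's own statement) =====
-- stated objective: simpler
-- what changed: Replaced A's nested loops (outer index scan plus an inner brace-balancing rescan per placeholder) by one flat pass over the characters keeping an integer depth and the current placeholder's content buffer.
import Mathlib
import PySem

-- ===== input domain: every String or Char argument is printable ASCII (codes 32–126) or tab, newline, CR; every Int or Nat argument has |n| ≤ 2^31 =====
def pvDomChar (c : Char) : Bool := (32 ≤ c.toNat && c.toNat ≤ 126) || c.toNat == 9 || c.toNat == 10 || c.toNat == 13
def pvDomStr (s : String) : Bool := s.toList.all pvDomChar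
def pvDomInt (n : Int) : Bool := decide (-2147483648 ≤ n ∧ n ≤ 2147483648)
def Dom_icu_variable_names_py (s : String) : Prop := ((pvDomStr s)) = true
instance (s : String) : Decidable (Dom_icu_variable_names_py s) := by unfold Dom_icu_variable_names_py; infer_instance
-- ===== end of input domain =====

-- B is a single flat fold over the characters with a depth counter and a content buffer,
-- replacing A's nested index scans; same return value, objective: simpler decomposition.

-- ===== PORT A =====
-- A's inner `while j < n and depth > 0` scan: the remaining suffix of the string stands for
-- the index j, `acc` is the content s[i+1:j] consumed so far (exact, step for step).
def icuInnerA (cs : List Char) (depth : Nat) (acc : List Char) :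
    Option (List Char × List Char) :=
  match cs with
  | [] => none                           -- j reached n with depth > 0: unbalanced
  | c :: rest =>
      let depth' := if c = '{' then depth + 1 else if c = '}' then depth - 1 else depth
      if depth' = 0 then some (acc, rest)    -- matching '}' found; content excludes it
      else icuInnerA rest depth' (acc ++ [c])

-- needed by icuOuterA's termination proof
theorem icuInnerA_length (cs : List Char) (depth : Nat) (acc inner rest : List Char)
    (h : icuInnerA cs depth acc = some (inner, rest)) : rest.length < cs.length := by
  induction cs generalizing depth acc with
  | nil => simp [icuInnerA] at h
  | cons c tl ih =>
      rw [icuInnerA] at h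
      by_cases h0 : (if c = '{' then depth + 1 else if c = '}' then depth - 1 else depth) = 0
      · rw [if_pos h0] at h
        simp only [Option.some.injEq, Prod.mk.injEq] at h
        simp [← h.2]
      · rw [if_neg h0] at h
        exact Nat.lt_trans (ih _ _ h) (by simp)

-- A's outer `while i < n` loop: skip non-'{', else balance-match; `break` on unbalanced.
def icuOuterA (cs : List Char) : List String :=
  match cs with
  | [] => []
  | c :: rest =>
      if c ≠ '{' then icuOuterA rest
      else
        match h : icuInnerA rest 1 [] with
        | none => []                       -- unbalanced: bail, rest is literal
        | some (inner, rest') =>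
            -- head = inner.split(",", 1)[0].strip()
            String.ofList (PySem.Chars.strip ((PySem.Chars.splitOnMax inner [','] 1).headD []))
              :: icuOuterA rest'
termination_by cs.length
decreasing_by
  · simp
  · have := icuInnerA_length rest 1 [] inner rest' h
    simp; omega

def icu_variable_names_py (s : String) : List String := icuOuterA s.toList

-- ===== PORT B =====
-- state: (depth, buf = content of the currently open top-level placeholder, names)
def icuStepB (st : Nat × List Char × List String) (c : Char) :
    Nat × List Char × List String :=
  match st with
  | (depth, buf, names) =>
      if c = '{' then
        (depth + 1, if depth = 0 then [] else buf ++ [c], names)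
      else if c = '}' ∧ 0 < depth then
        if depth - 1 = 0 then
          (0, buf,
            names ++ [String.ofList (PySem.Chars.strip
              ((PySem.Chars.splitOnMax buf [','] 1).headD []))])
        else (depth - 1, buf ++ [c], names)
      else
        (depth, if 0 < depth then buf ++ [c] else buf, names)

def icu_variable_names_py_alt (s : String) : List String :=
  (s.toList.foldl icuStepB (0, [], [])).2.2

-- ===== PRECONDITION & SPEC =====
def Spec_icu_variable_names_py (s : String) (out : List String) : Prop := out = icu_variable_names_py_alt s
instance (s : String) (out : List String) : Decidable (Spec_icu_variable_names_py s out) := by unfold Spec_icu_variable_names_py; infer_instance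

-- ===== CLAIM (what is proved, stated in full; the proofs are below) =====
def Claim_equal_icu_variable_names_py : Prop := ∀ (s : String), Dom_icu_variable_names_py s → Spec_icu_variable_names_py s (icu_variable_names_py s)

-- ===== LEMMAS AND PROOFS =====

-- While inside a placeholder (depth > 0), B's fold tracks A's inner scan exactly:
-- if the scan closes with content `inner`, B emits the same name and continues from depth 0.
theorem inner_sim_some (cs : List Char) :
    ∀ (d : Nat) (buf : List Char) (names : List String) (inner rest : List Char),
      0 < d → icuInnerA cs d buf = some (inner, rest) →
      List.foldl icuStepB (d, buf, names) cs =
        List.foldl icuStepB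
          (0, inner,
            names ++ [String.ofList (PySem.Chars.strip
              ((PySem.Chars.splitOnMax inner [','] 1).headD []))]) rest := by
  induction cs with
  | nil => intro d buf names inner rest hd h; simp [icuInnerA] at h
  | cons c tl ih =>
      intro d buf names inner rest hd h
      rw [icuInnerA] at h
      by_cases hc : c = '{'
      · rw [if_pos hc, if_neg (by omega : ¬ d + 1 = 0)] at h
        rw [List.foldl_cons, icuStepB, if_pos hc, if_neg (by omega : ¬ d = 0)]
        exact ih _ _ names _ _ (by omega) h
      · by_cases hc2 : c = '}'
        · rw [if_neg hc, if_pos hc2] at h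
          by_cases hd1 : d - 1 = 0
          · rw [if_pos hd1] at h
            simp only [Option.some.injEq, Prod.mk.injEq] at h
            obtain ⟨rfl, rfl⟩ := h
            rw [List.foldl_cons, icuStepB, if_neg hc, if_pos (⟨hc2, hd⟩ : c = '}' ∧ 0 < d),
              if_pos hd1]
          · rw [if_neg hd1] at h
            rw [List.foldl_cons, icuStepB, if_neg hc, if_pos (⟨hc2, hd⟩ : c = '}' ∧ 0 < d),
              if_neg hd1]
            exact ih _ _ names _ _ (by omega) h
        · rw [if_neg hc, if_neg hc2, if_neg (by omega : ¬ d = 0)] at h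
          rw [List.foldl_cons, icuStepB, if_neg hc,
            if_neg (fun hh => hc2 hh.1 : ¬ (c = '}' ∧ 0 < d)), if_pos hd]
          exact ih _ _ names _ _ hd h

-- If A's inner scan never closes, B emits nothing for the rest of the string.
theorem inner_sim_none (cs : List Char) :
    ∀ (d : Nat) (buf : List Char) (names : List String),
      0 < d → icuInnerA cs d buf = none →
      ∃ d' buf', List.foldl icuStepB (d, buf, names) cs = (d', buf', names) ∧ 0 < d' := by
  induction cs with
  | nil => intro d buf names hd _; exact ⟨d, buf, rfl, hd⟩
  | cons c tl ih =>
      intro d buf names hd h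
      rw [icuInnerA] at h
      by_cases hc : c = '{'
      · rw [if_pos hc, if_neg (by omega : ¬ d + 1 = 0)] at h
        rw [List.foldl_cons, icuStepB, if_pos hc, if_neg (by omega : ¬ d = 0)]
        exact ih _ _ names (by omega) h
      · by_cases hc2 : c = '}'
        · rw [if_neg hc, if_pos hc2] at h
          by_cases hd1 : d - 1 = 0
          · rw [if_pos hd1] at h; exact absurd h (by simp)
          · rw [if_neg hd1] at h
            rw [List.foldl_cons, icuStepB, if_neg hc, if_pos (⟨hc2, hd⟩ : c = '}' ∧ 0 < d),
              if_neg hd1]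
            exact ih _ _ names (by omega) h
        · rw [if_neg hc, if_neg hc2, if_neg (by omega : ¬ d = 0)] at h
          rw [List.foldl_cons, icuStepB, if_neg hc,
            if_neg (fun hh => hc2 hh.1 : ¬ (c = '}' ∧ 0 < d)), if_pos hd]
          exact ih _ _ names hd h

-- At depth 0, B's fold appends exactly the names A's outer loop produces.
theorem outer_sim (cs : List Char) :
    ∀ (buf : List Char) (names : List String),
      (List.foldl icuStepB (0, buf, names) cs).2.2 = names ++ icuOuterA cs := by
  induction cs using icuOuterA.induct with
  | case1 => intro buf names; simp [icuOuterA]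
  | case2 c rest hc ih =>
      intro buf names
      have hstep : icuStepB (0, buf, names) c = (0, buf, names) := by
        simp [icuStepB, hc]
      rw [List.foldl_cons, hstep, ih, icuOuterA, if_pos hc]
  | case3 c rest hc h =>
      intro buf names
      have hc' : c = '{' := by simpa using hc
      have hstep : icuStepB (0, buf, names) c = (1, [], names) := by
        simp [icuStepB, hc']
      rw [List.foldl_cons, hstep]
      obtain ⟨d', buf', heq, _⟩ := inner_sim_none rest 1 [] names (by omega) h
      rw [heq]
      rw [icuOuterA, if_neg (by simp [hc'])]
      split <;> simp_all
  | case4 c rest hc inner rest' h ih =>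
      intro buf names
      have hc' : c = '{' := by simpa using hc
      have hstep : icuStepB (0, buf, names) c = (1, [], names) := by
        simp [icuStepB, hc']
      rw [List.foldl_cons, hstep,
        inner_sim_some rest 1 [] names inner rest' (by omega) h, ih]
      rw [icuOuterA, if_neg (by simp [hc'])]
      split <;> simp_all

-- ===== VERDICT (by name: the statement is the Claim_ definition above) =====
theorem icu_variable_names_py_spec : Claim_equal_icu_variable_names_py := by
  intro s _
  unfold Spec_icu_variable_names_py icu_variable_names_py icu_variable_names_py_alt
  rw [outer_sim s.toList [] []]
  simp
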